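-- pv_equiv track=rewrite | github.com/luckykamon/IPT | TD/td08a.py | admet_attracteur_principal
-- ===== SOURCE A (Python) =====
-- def admet_attracteur_principal(t):#version desirable
--   n = len(t)
--   #recherche de point fixe et verification de l'unicite
--   pt_fixe = False
--   for k in range(n):
--     if t[k] == k:
--       if pt_fixe:
--         return False
--       else:
--         z = k
--         pt_fixe = True
--   if not pt_fixe:
--     return False
--   #verification pour chaque x dans t
--   for x in range(n):
--     y = x
--     for k in range(1,n):
--       y = t[y]
--       if y == z:
--         break
--       if k == n-1:
--         return False
--   return True
-- ===== SOURCE B (Python) =====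
-- def admet_attracteur_principal(t):
--     # B: unique fixed point z, then check f^(n-1)(x) == z for all x, where
--     # f^(n-1) is computed pointwise by binary exponentiation (composition of index maps).
--     n = len(t)
--     fixed = [k for k in range(n) if t[k] == k]
--     if len(fixed) != 1:
--         return False
--     z = fixed[0]
--     p = list(range(n))        # identity map
--     q = t                     # f^1
--     e = n - 1
--     while e > 0:
--         if e & 1:
--             p = [q[v] for v in p]
--         e >>= 1
--         if e:
--             q = [q[v] for v in q]
--     return all(v == z for v in p)
-- ===== Notes on version B (the rewrite author's own statement) =====
-- stated objective: alternative
-- what changed: A walks the successor chain from every node (up to n-1 steps each); B finds the unique fixed point from the same scan and then tabulates the (n-1)-fold composition of the index map by binary exponentiation, checking it is constantly z.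
-- outside the precondition, e.g. on admet_attracteur_principal([0, 2, 5]): A returns False, B raises IndexError
import Mathlib
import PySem

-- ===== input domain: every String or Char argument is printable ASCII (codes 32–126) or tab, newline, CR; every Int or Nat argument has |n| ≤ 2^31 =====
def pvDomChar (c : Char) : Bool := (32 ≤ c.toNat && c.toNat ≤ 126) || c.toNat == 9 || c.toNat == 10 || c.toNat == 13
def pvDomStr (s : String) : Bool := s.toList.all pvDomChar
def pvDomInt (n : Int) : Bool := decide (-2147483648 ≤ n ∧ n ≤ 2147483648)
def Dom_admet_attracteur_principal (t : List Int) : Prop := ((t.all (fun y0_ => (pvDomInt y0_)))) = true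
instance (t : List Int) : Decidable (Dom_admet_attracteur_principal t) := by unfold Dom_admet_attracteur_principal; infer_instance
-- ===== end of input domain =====

-- B replaces A's per-start-node chain walk by one pointwise binary-exponentiation of the
-- index map (f^(n-1) tabulated once), a structurally different alternative to A's nested scan.


-- ===== PORT A =====
-- first loop: search for a fixed point and check its uniqueness; `none` = early `return False`
-- (t[k] for k in range(n) is always in range, so `.getD 0` never supplies its default).
def pvA_find (t : List Int) : List Int → Bool → Int → Option (Bool × Int)
  | [], pf, z => some (pf, z)
  | k :: ks, pf, z =>
      if (PySem.List.pyGet? t k).getD 0 == k then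
        if pf then none else pvA_find t ks true k
      else pvA_find t ks pf z

-- inner `for k in range(1, n)` loop; `none` = Python raises IndexError on t[y]
-- (excluded by Pre_), `some true` = break / loop exhausted, `some false` = `return False`.
def pvA_inner (t : List Int) (n z : Int) : Int → List Int → Option Bool
  | _, [] => some true
  | y, k :: ks =>
      match PySem.List.pyGet? t y with
      | none => none
      | some y' =>
          if y' == z then some true
          else if k == n - 1 then some false
          else pvA_inner t n z y' ks

-- outer `for x in range(n)` loop
def pvA_outer (t : List Int) (n z : Int) : List Int → Option Bool
  | [] => some true
  | x :: xs =>
      match pvA_inner t n z x (PySem.List.pyRange 1 n 1) with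
      | none => none
      | some false => some false
      | some true => pvA_outer t n z xs

def admet_attracteur_principal (t : List Int) : Bool :=
  let n : Int := t.length
  match pvA_find t (PySem.List.pyRange 0 n 1) false 0 with
  | none => false
  | some (pf, z) =>
      if !pf then false
      else (pvA_outer t n z (PySem.List.pyRange 0 n 1)).getD false
      -- the `.getD false` branch is Python raising IndexError, excluded by Pre_

-- ===== PORT B =====
-- [q[v] for v in p]  (all lookups are in range under Pre_, so `.getD 0` never fires there)
def pvB_comp (q p : List Int) : List Int :=
  p.map (fun v => (PySem.List.pyGet? q v).getD 0)

-- the `while e > 0` binary-exponentiation loop of Source B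
def pvB_pow (q p : List Int) (e : Nat) : List Int :=
  if e = 0 then p
  else
    let p' := if e % 2 = 1 then pvB_comp q p else p
    let e' := e / 2
    let q' := if e' = 0 then q else pvB_comp q q
    pvB_pow q' p' e'

def admet_attracteur_principal_alt (t : List Int) : Bool :=
  let n : Int := t.length
  let fixed := (PySem.List.pyRange 0 n 1).filter (fun k => (PySem.List.pyGet? t k).getD 0 == k)
  if fixed.length ≠ 1 then false
  else
    let z := fixed.headD 0
    let p := pvB_pow t (PySem.List.pyRange 0 n 1) (n - 1).toNat
    p.all (fun v => v == z)

-- ===== PRECONDITION & SPEC =====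
-- Pre_ excludes the inputs with n ≥ 3 entries, exactly one fixed point and some entry
-- outside [-n, n): there A either raises IndexError on t[y], or (when an earlier chain
-- exhausts its n-1 steps first) returns False while B's composition raises IndexError.
def Pre_admet_attracteur_principal (t : List Int) : Prop :=
  t.length ≤ 2 ∨
  ((PySem.List.pyRange 0 (t.length : Int) 1).filter
      (fun k => (PySem.List.pyGet? t k).getD 0 == k)).length ≠ 1 ∨
  (∀ v ∈ t, -(t.length : Int) ≤ v ∧ v < (t.length : Int))

instance (t : List Int) : Decidable (Pre_admet_attracteur_principal t) := by
  unfold Pre_admet_attracteur_principal; infer_instance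

def pvWitness_admet_attracteur_principal : List Int := [1, 1, 1]

def Spec_admet_attracteur_principal (t : List Int) (out : Bool) : Prop := out = admet_attracteur_principal_alt t
instance (t : List Int) (out : Bool) : Decidable (Spec_admet_attracteur_principal t out) := by unfold Spec_admet_attracteur_principal; infer_instance

-- ===== CLAIM (what is proved, stated in full; the proofs are below) =====
def Claim_equal_admet_attracteur_principal : Prop := ∀ (t : List Int), Dom_admet_attracteur_principal t → Pre_admet_attracteur_principal t → Spec_admet_attracteur_principal t (admet_attracteur_principal t)

-- ===== LEMMAS AND PROOFS =====

-- the successor map x ↦ t[x] (Python indexing, so a negative index wraps)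
def pvF (t : List Int) (v : Int) : Int := (PySem.List.pyGet? t v).getD 0

-- "v is a legal Python index into t"
def pvS (t : List Int) (v : Int) : Prop := -(t.length : Int) ≤ v ∧ v < (t.length : Int)

theorem pvF_get {t : List Int} {v : Int} (hv : pvS t v) :
    PySem.List.pyGet? t v = some (pvF t v) := by
  cases h : PySem.List.pyGet? t v with
  | none => rw [PySem.List.pyGet?_eq_none_iff] at h; exact absurd ⟨hv.1, hv.2⟩ h
  | some u => simp [pvF, h]

theorem pvF_mem {t : List Int} {v : Int} (hv : pvS t v) : pvF t v ∈ t :=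
  PySem.List.mem_of_pyGet?_eq_some t (pvF_get hv)

theorem pvS_F {t : List Int} (hrange : ∀ v ∈ t, pvS t v) {v : Int} (hv : pvS t v) :
    pvS t (pvF t v) := hrange _ (pvF_mem hv)

theorem pvS_iter {t : List Int} (hrange : ∀ v ∈ t, pvS t v) {v : Int} (hv : pvS t v)
    (m : Nat) : pvS t ((pvF t)^[m] v) := by
  induction m generalizing v with
  | zero => exact hv
  | succ m ih => rw [Function.iterate_succ_apply]; exact ih (pvS_F hrange hv)

-- Python lookup wraps: t[v] = t[v + n] for -n ≤ v < 0
theorem pvF_wrap {t : List Int} {v : Int} (h1 : -(t.length : Int) ≤ v) (h2 : v < 0) :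
    pvF t v = pvF t (v + t.length) := by
  obtain ⟨k, hk⟩ : ∃ k : Nat, (k : Int) = -v := ⟨(-v).toNat, Int.toNat_of_nonneg (by omega)⟩
  have hk1 : 0 < k := by omega
  have hk2 : k ≤ t.length := by omega
  have hv : v = -(k : Int) := by omega
  unfold pvF
  rw [hv, PySem.List.pyGet?_neg_natCast t k hk1 hk2,
    PySem.List.pyGet?_of_nonneg t (show (0:Int) ≤ -(k : Int) + t.length by omega)]
  have he : t.length - k = (-(k : Int) + t.length).toNat := by omega
  rw [he]

theorem pvF_iter_wrap {t : List Int} {v : Int} (h1 : -(t.length : Int) ≤ v) (h2 : v < 0)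
    {a : Nat} (ha : 1 ≤ a) : (pvF t)^[a] v = (pvF t)^[a] (v + t.length) := by
  obtain ⟨a', rfl⟩ := Nat.exists_eq_add_of_le ha
  rw [Nat.add_comm, Function.iterate_add_apply, Function.iterate_add_apply,
    Function.iterate_one, pvF_wrap h1 h2]

-- ---------- phase 1: A's fixed-point scan vs B's filter ----------

theorem find_true (t : List Int) (l : List Int) (z : Int) :
    pvA_find t l true z =
      if l.filter (fun k => (PySem.List.pyGet? t k).getD 0 == k) = [] then some (true, z)
      else none := by
  induction l with
  | nil => simp [pvA_find]
  | cons k ks ih =>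
      by_cases h : ((PySem.List.pyGet? t k).getD 0 == k) = true
      · simp [pvA_find, h]
      · simp only [Bool.not_eq_true] at h
        simp [pvA_find, h, ih]

theorem find_false (t : List Int) (l : List Int) :
    pvA_find t l false 0 =
      match l.filter (fun k => (PySem.List.pyGet? t k).getD 0 == k) with
      | [] => some (false, 0)
      | [z] => some (true, z)
      | _ :: _ :: _ => none := by
  induction l with
  | nil => simp [pvA_find]
  | cons k ks ih =>
      by_cases h : ((PySem.List.pyGet? t k).getD 0 == k) = true
      · simp only [pvA_find, List.filter_cons, h, if_true, if_false, Bool.false_eq_true,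
          find_true]
        cases hf : ks.filter (fun k => (PySem.List.pyGet? t k).getD 0 == k) with
        | nil => simp
        | cons a as => simp
      · simp only [Bool.not_eq_true] at h
        simp [pvA_find, h, ih]

-- ---------- phase 2, A side: the chain walk decides f^[n-j] x = z ----------

theorem inner_eq {t : List Int} (hrange : ∀ v ∈ t, pvS t v) {z : Int}
    (hz : pvF t z = z) :
    ∀ (m : Nat), 1 ≤ m → ∀ (j : Int), j = (t.length : Int) - m → 1 ≤ j →
      ∀ (y : Int), pvS t y →
        pvA_inner t (t.length : Int) z y (PySem.List.pyRange j (t.length : Int) 1) =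
          some (decide ((pvF t)^[m] y = z)) := by
  intro m hm
  induction m, hm using Nat.le_induction with
  | base =>
      intro j hj hj1 y hy
      have hsing : PySem.List.pyRange j (t.length : Int) 1 = [j] := by
        rw [show (t.length : Int) = j + 1 by omega]
        exact PySem.List.pyRange_one_singleton j
      rw [hsing]
      simp only [pvA_inner, pvF_get hy]
      by_cases hyz : pvF t y = z
      · simp [hyz]
      · have h1 : (pvF t y == z) = false := by simp [hyz]
        have h2 : (j == (t.length : Int) - 1) = true := by simp; omega
        simp [h1, h2, hyz]
  | succ m hm ih =>
      intro j hj hj1 y hy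
      have hjlt : j < (t.length : Int) := by omega
      rw [PySem.List.pyRange_one_cons hjlt]
      simp only [pvA_inner, pvF_get hy]
      by_cases hyz : pvF t y = z
      · have : (pvF t)^[m + 1] y = z := by
          rw [Function.iterate_succ_apply, hyz, Function.iterate_fixed hz]
        simp [hyz, this]
      · have h1 : (pvF t y == z) = false := by simp [hyz]
        have h2 : (j == (t.length : Int) - 1) = false := by
          simp only [beq_eq_false_iff_ne, ne_eq]; omega
        simp only [h1, h2, Bool.false_eq_true, if_false]
        rw [ih (j + 1) (by omega) (by omega) (pvF t y) (pvS_F hrange hy)]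
        rw [Function.iterate_succ_apply]

theorem outer_eq {t : List Int} (hrange : ∀ v ∈ t, pvS t v) {z : Int}
    (hz : pvF t z = z) (hn : 2 ≤ t.length) :
    ∀ (l : List Int), (∀ x ∈ l, pvS t x) →
      pvA_outer t (t.length : Int) z l =
        some (l.all (fun x => decide ((pvF t)^[t.length - 1] x = z))) := by
  intro l hl
  induction l with
  | nil => simp [pvA_outer]
  | cons x xs ih =>
      have hx := hl x (by simp)
      have hinner := inner_eq hrange hz (t.length - 1) (by omega) 1 (by omega)
        (by omega) x hx
      simp only [pvA_outer, hinner]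
      by_cases hxz : (pvF t)^[t.length - 1] x = z
      · simp only [hxz, decide_true]
        rw [ih (fun a ha => hl a (by simp [ha]))]
        simp [hxz]
      · simp [hxz]

-- ---------- phase 2, B side: binary exponentiation tabulates f^[e] ----------

-- the list tabulating f^[a] on indices 0..n-1
def pvM (t : List Int) (a : Nat) : List Int :=
  (PySem.List.pyRange 0 (t.length : Int) 1).map ((pvF t)^[a])

theorem pvM_lookup {t : List Int} {a : Nat} (ha : 1 ≤ a)
    {v : Int} (hv : pvS t v) :
    (PySem.List.pyGet? (pvM t a) v).getD 0 = (pvF t)^[a] v := by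
  obtain ⟨hv1, hv2⟩ := hv
  by_cases hv0 : 0 ≤ v
  · obtain ⟨k, hk⟩ : ∃ k : Nat, (k : Int) = v := ⟨v.toNat, Int.toNat_of_nonneg hv0⟩
    rw [pvM, ← hk, PySem.List.pyGet?_natCast,
      PySem.List.getElem?_map_pyRange_zero _ t.length k (by omega)]
    simp
  · obtain ⟨k, hk⟩ : ∃ k : Nat, (k : Int) = -v := ⟨(-v).toNat, Int.toNat_of_nonneg (by omega)⟩
    have hvneg : v < 0 := by omega
    have hvk : v = -(k : Int) := by omega
    rw [pvM, hvk, PySem.List.pyGet?_neg_natCast _ k (by omega)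
        (by rw [List.length_map, PySem.List.length_pyRange_one]; omega)]
    rw [List.length_map, PySem.List.length_pyRange_one]
    have hlen : ((t.length : Int) - 0).toNat = t.length := by omega
    rw [hlen, PySem.List.getElem?_map_pyRange_zero _ t.length (t.length - k) (by omega)]
    simp only [Option.getD_some]
    have : ((t.length - k : Nat) : Int) = v + t.length := by omega
    rw [this, ← pvF_iter_wrap hv1 (by omega) ha, hvk]

theorem t_repr (t : List Int) : t = pvM t 1 := by
  apply List.ext_getElem
  · simp [pvM, PySem.List.length_pyRange_one]
  · intro i h1 h2
    simp only [pvM]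
    have hi : i < t.length := h1
    rw [List.getElem_map, PySem.List.getElem_pyRange_one 0 (t.length : Int) i
      (by rw [PySem.List.length_pyRange_one]; omega)]
    simp only [Function.iterate_one, pvF, zero_add, PySem.List.pyGet?_natCast]
    simp [hi]

theorem range_repr (t : List Int) :
    PySem.List.pyRange 0 (t.length : Int) 1 = pvM t 0 := by
  simp [pvM]

theorem comp_M {t : List Int} (hrange : ∀ v ∈ t, pvS t v) {a b : Nat} (ha : 1 ≤ a) :
    pvB_comp (pvM t a) (pvM t b) = pvM t (a + b) := by
  rw [pvB_comp, pvM, pvM, List.map_map]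
  apply List.map_congr_left
  intro x hx
  rw [PySem.List.mem_pyRange_one] at hx
  simp only [Function.comp_apply]
  rw [show List.map (pvF t)^[a] (PySem.List.pyRange 0 (t.length : Int)) = pvM t a from rfl]
  rw [pvM_lookup ha (pvS_iter hrange ⟨by omega, hx.2⟩ b), ← Function.iterate_add_apply]

theorem pow_M {t : List Int} (hrange : ∀ v ∈ t, pvS t v) :
    ∀ (e : Nat) (a b : Nat), 1 ≤ a →
      pvB_pow (pvM t a) (pvM t b) e = pvM t (b + a * e) := by
  intro e
  induction e using Nat.strong_induction_on with
  | _ e ih =>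
      intro a b ha
      rw [pvB_pow]
      by_cases he : e = 0
      · simp [he]
      · simp only [he, if_false]
        have hp' : (if e % 2 = 1 then pvB_comp (pvM t a) (pvM t b) else pvM t b)
            = pvM t (b + a * (e % 2)) := by
          by_cases h2 : e % 2 = 1
          · rw [if_pos h2, comp_M hrange ha, h2]; ring_nf
          · rw [if_neg h2]
            have : e % 2 = 0 := by omega
            rw [this]; ring_nf
        rw [hp']
        by_cases he2 : e / 2 = 0
        · have : e = 1 := by omega
          subst this
          simp [pvB_pow]
        · rw [if_neg he2, comp_M hrange ha,
            ih (e / 2) (by omega) (a + a) (b + a * (e % 2)) (by omega)]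
          congr 1
          have : e % 2 + 2 * (e / 2) = e := by omega
          nlinarith [this]

-- ---------- small sizes: A = B outright for n ≤ 2 ----------

theorem small_eq (t : List Int) (h : t.length ≤ 2) :
    admet_attracteur_principal t = admet_attracteur_principal_alt t := by
  have r01 : PySem.List.pyRange 0 1 1 = [0] := by decide
  have r02 : PySem.List.pyRange 0 2 1 = [0, 1] := by decide
  have r12 : PySem.List.pyRange 1 2 1 = [1] := by decide
  match t with
  | [] => simp [admet_attracteur_principal, admet_attracteur_principal_alt, pvA_find]
  | [a] =>
      have g0 : PySem.List.pyGet? [a] 0 = some a := rfl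
      by_cases ha : a = 0
      · subst ha
        simp [admet_attracteur_principal, admet_attracteur_principal_alt,
          pvA_find, pvA_outer, pvA_inner, pvB_pow, r01]
      · simp [admet_attracteur_principal, admet_attracteur_principal_alt,
          pvA_find, r01, ha]
  | [a, b] =>
      have g0 : PySem.List.pyGet? [a, b] 0 = some a := rfl
      have g1 : PySem.List.pyGet? [a, b] 1 = some b := rfl
      by_cases ha : a = 0 <;> by_cases hb : b = 1 <;>
        [skip; skip; skip;
         · simp [admet_attracteur_principal, admet_attracteur_principal_alt,
             pvA_find, r02, ha, hb]]
      · subst ha; subst hb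
        simp [admet_attracteur_principal, admet_attracteur_principal_alt,
          pvA_find, r02]
      · subst ha
        by_cases hb0 : b = 0 <;>
          simp [admet_attracteur_principal, admet_attracteur_principal_alt,
            pvA_find, pvA_outer, pvA_inner, pvB_pow, pvB_comp, r02, r12, hb, hb0]
      · subst hb
        by_cases ha1 : a = 1 <;>
          simp [admet_attracteur_principal, admet_attracteur_principal_alt,
            pvA_find, pvA_outer, pvA_inner, pvB_pow, pvB_comp, r02, r12, ha, ha1]

-- ===== VERDICT (by name: the statement is the Claim_ definition above) =====
theorem admet_attracteur_principal_spec : Claim_equal_admet_attracteur_principal := by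
  intro t _hdom hpre
  unfold Spec_admet_attracteur_principal
  by_cases hsmall : t.length ≤ 2
  · exact small_eq t hsmall
  · have hA := find_false t (PySem.List.pyRange 0 (t.length : Int) 1)
    cases hF : (PySem.List.pyRange 0 (t.length : Int) 1).filter
        (fun k => (PySem.List.pyGet? t k).getD 0 == k) with
    | nil =>
        rw [hF] at hA
        simp [admet_attracteur_principal, admet_attracteur_principal_alt, hA, hF]
    | cons z zs =>
        cases zs with
        | cons w ws =>
            rw [hF] at hA
            simp [admet_attracteur_principal, admet_attracteur_principal_alt, hA, hF]
        | nil =>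
            rw [hF] at hA
            -- extract the in-range hypothesis from Pre_
            have hrange : ∀ v ∈ t, pvS t v := by
              rcases hpre with h | h | h
              · omega
              · rw [hF] at h; simp at h
              · exact fun v hv => h v hv
            have hzmem := List.mem_filter.mp (hF ▸ (List.mem_singleton_self z : z ∈ [z]))
            have hz0 : 0 ≤ z ∧ z < (t.length : Int) :=
              PySem.List.mem_pyRange_one.mp hzmem.1
            have hzfix : pvF t z = z := by
              have := hzmem.2; simpa [pvF] using this
            -- A's value
            simp only [admet_attracteur_principal, hA]
            rw [outer_eq hrange hzfix (by omega) _ (fun x hx => by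
              rw [PySem.List.mem_pyRange_one] at hx; exact ⟨by omega, hx.2⟩)]
            -- B's value
            simp only [admet_attracteur_principal_alt, hF]
            have hpow : pvB_pow t (PySem.List.pyRange 0 (t.length : Int) 1)
                ((t.length : Int) - 1).toNat = pvM t (t.length - 1) := by
              have h1 : pvB_pow t (PySem.List.pyRange 0 (t.length : Int) 1)
                  ((t.length : Int) - 1).toNat
                  = pvB_pow (pvM t 1) (pvM t 0) ((t.length : Int) - 1).toNat := by
                rw [← t_repr, ← range_repr]
              have he : ((t.length : Int) - 1).toNat = t.length - 1 := by omega
              rw [h1, pow_M hrange _ 1 0 le_rfl, he]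
              norm_num
            rw [hpow]
            simp only [pvM, List.all_map]
            rfl
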